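-- pv_equiv track=rewrite | github.com/amir110011/amir315 | extentions/utils.py | number_convertor
-- ===== SOURCE A (Python) =====
-- def number_convertor(mystr):
--     nums = {
--         "1": "۱",
--         "2": "۲",
--         "3": "۳",
--         "4": "۴",
--         "5": "۵",
--         "6": "۶",
--         "7": "۷",
--         "8": "۸",
--         "9": "۹",
--         "0": "۰",
--
--     }
--     for e, p in nums.items():
--         mystr=mystr.replace(e, p)
--     return mystr
-- ===== SOURCE B (Python) =====
-- def number_convertor(mystr):
--     # Single pass over the characters with a translation table,
--     # instead of ten full-string replace passes.
--     table = dict(zip("1234567890", "۱۲۳۴۵۶۷۸۹۰"))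
--     return ''.join(table.get(c, c) for c in mystr)
-- ===== Notes on version B (the rewrite author's own statement) =====
-- stated objective: alternative
-- what changed: B makes one pass over the characters with a char-to-char translation table built by zip, instead of A's ten sequential full-string str.replace passes; asymptotically one traversal instead of ten, though A's C-level replace is faster in wall time.
import Mathlib
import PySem

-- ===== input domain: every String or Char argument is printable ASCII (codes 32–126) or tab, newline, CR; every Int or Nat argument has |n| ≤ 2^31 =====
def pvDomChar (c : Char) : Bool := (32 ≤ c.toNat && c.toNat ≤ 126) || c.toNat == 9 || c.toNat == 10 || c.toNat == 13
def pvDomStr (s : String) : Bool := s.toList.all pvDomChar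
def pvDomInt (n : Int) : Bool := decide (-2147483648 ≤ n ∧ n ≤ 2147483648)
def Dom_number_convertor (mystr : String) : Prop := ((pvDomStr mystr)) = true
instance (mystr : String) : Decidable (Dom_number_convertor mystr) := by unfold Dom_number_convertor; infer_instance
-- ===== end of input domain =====

-- B replaces A's ten sequential full-string replace passes by a single character-by-character
-- pass with a char→char translation table (an alternative one-traversal algorithm).


-- ===== PORT A =====
def number_convertor (mystr : String) : String :=
  let nums : PySem.Dict String String := PySem.Dict.ofList
    [("1","۱"),("2","۲"),("3","۳"),("4","۴"),("5","۵"),("6","۶"),("7","۷"),("8","۸"),("9","۹"),("0","۰")]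
  nums.items.foldl (fun s ep => PySem.Str.replace s ep.1 ep.2) mystr

-- ===== PORT B =====
-- dict(zip("1234567890", "۱۲۳۴۵۶۷۸۹۰")): the length-1 Python string keys/values are Chars here
def pvTableB : PySem.Dict Char Char :=
  PySem.Dict.ofList (List.zip "1234567890".toList "۱۲۳۴۵۶۷۸۹۰".toList)

-- ''.join of the one-character pieces table.get(c, c) is ported as String.ofList of the chars (exact)
def number_convertor_alt (mystr : String) : String :=
  String.ofList (mystr.toList.map (fun c => pvTableB.getD c c))

-- ===== PRECONDITION & SPEC =====
def Spec_number_convertor (mystr : String) (out : String) : Prop := out = number_convertor_alt mystr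
instance (mystr : String) (out : String) : Decidable (Spec_number_convertor mystr out) := by unfold Spec_number_convertor; infer_instance

-- ===== CLAIM (what is proved, stated in full; the proofs are below) =====
def Claim_equal_number_convertor : Prop := ∀ (mystr : String), Dom_number_convertor mystr → Spec_number_convertor mystr (number_convertor mystr)

-- ===== LEMMAS AND PROOFS =====

-- A's replace with a one-char pattern and one-char replacement is a per-character substitution
theorem pv_go_single (c d : Char) : ∀ (l : List Char) (fuel : Nat) (acc : List Char), l.length ≤ fuel →
    PySem.Chars.replace.go [c] [d] fuel l acc = acc.reverse ++ l.map (fun x => if x = c then d else x) := by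
  intro l
  induction l with
  | nil => intro fuel acc h; cases fuel <;> simp [PySem.Chars.replace.go]
  | cons x t ih =>
    intro fuel acc h
    cases fuel with
    | zero => simp at h
    | succ n =>
      simp only [PySem.Chars.replace.go]
      by_cases hx : c = x
      · subst hx
        simp [List.isPrefixOf, ih n _ (by simpa using h)]
      · simp [List.isPrefixOf, hx, Ne.symm hx, ih n _ (by simpa using h)]

theorem pv_replace_single (cs : List Char) (c d : Char) :
    PySem.Chars.replace cs [c] [d] = cs.map (fun x => if x = c then d else x) := by
  simpa [PySem.Chars.replace] using pv_go_single c d cs cs.length [] le_rfl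

-- the per-character function A's ten replace passes compose to (pass "1" first, …, "0" last)
def pvSub (c d x : Char) : Char := if x = c then d else x
def pvCharA (x : Char) : Char :=
  pvSub '0' '۰' (pvSub '9' '۹' (pvSub '8' '۸' (pvSub '7' '۷' (pvSub '6' '۶'
    (pvSub '5' '۵' (pvSub '4' '۴' (pvSub '3' '۳' (pvSub '2' '۲' (pvSub '1' '۱' x)))))))))

theorem pv_toList_A (mystr : String) :
    (number_convertor mystr).toList = mystr.toList.map pvCharA := by
  have h1 : ("1" : String).toList = ['1'] := by decide
  have h2 : ("2" : String).toList = ['2'] := by decide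
  have h3 : ("3" : String).toList = ['3'] := by decide
  have h4 : ("4" : String).toList = ['4'] := by decide
  have h5 : ("5" : String).toList = ['5'] := by decide
  have h6 : ("6" : String).toList = ['6'] := by decide
  have h7 : ("7" : String).toList = ['7'] := by decide
  have h8 : ("8" : String).toList = ['8'] := by decide
  have h9 : ("9" : String).toList = ['9'] := by decide
  have h0 : ("0" : String).toList = ['0'] := by decide
  have p1 : ("۱" : String).toList = ['۱'] := by decide
  have p2 : ("۲" : String).toList = ['۲'] := by decide
  have p3 : ("۳" : String).toList = ['۳'] := by decide
  have p4 : ("۴" : String).toList = ['۴'] := by decide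
  have p5 : ("۵" : String).toList = ['۵'] := by decide
  have p6 : ("۶" : String).toList = ['۶'] := by decide
  have p7 : ("۷" : String).toList = ['۷'] := by decide
  have p8 : ("۸" : String).toList = ['۸'] := by decide
  have p9 : ("۹" : String).toList = ['۹'] := by decide
  have p0 : ("۰" : String).toList = ['۰'] := by decide
  have hitems : (PySem.Dict.ofList
      ([("1","۱"),("2","۲"),("3","۳"),("4","۴"),("5","۵"),("6","۶"),("7","۷"),("8","۸"),("9","۹"),("0","۰")] :
        List (String × String))).items =
      [("1","۱"),("2","۲"),("3","۳"),("4","۴"),("5","۵"),("6","۶"),("7","۷"),("8","۸"),("9","۹"),("0","۰")] := by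
    decide
  have step : ∀ (s : String) (c d : Char) (a b : String), a.toList = [c] → b.toList = [d] →
      (PySem.Str.replace s a b).toList = s.toList.map (pvSub c d) := by
    intro s c d a b ha hb
    simp [PySem.Str.replace, ha, hb, pv_replace_single, pvSub]
  simp only [number_convertor, hitems, List.foldl]
  rw [step _ _ _ _ _ h0 p0, step _ _ _ _ _ h9 p9, step _ _ _ _ _ h8 p8, step _ _ _ _ _ h7 p7,
      step _ _ _ _ _ h6 p6, step _ _ _ _ _ h5 p5, step _ _ _ _ _ h4 p4, step _ _ _ _ _ h3 p3,
      step _ _ _ _ _ h2 p2, step _ _ _ _ _ h1 p1]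
  simp [List.map_map, pvCharA, Function.comp]

theorem pv_char_eq (ch : Char) : pvCharA ch = pvTableB.getD ch ch := by
  have hitems : pvTableB.items =
      [('1','۱'),('2','۲'),('3','۳'),('4','۴'),('5','۵'),('6','۶'),('7','۷'),('8','۸'),('9','۹'),('0','۰')] := by
    decide
  by_cases g1 : ch = '1'; · subst g1; decide
  by_cases g2 : ch = '2'; · subst g2; decide
  by_cases g3 : ch = '3'; · subst g3; decide
  by_cases g4 : ch = '4'; · subst g4; decide
  by_cases g5 : ch = '5'; · subst g5; decide
  by_cases g6 : ch = '6'; · subst g6; decide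
  by_cases g7 : ch = '7'; · subst g7; decide
  by_cases g8 : ch = '8'; · subst g8; decide
  by_cases g9 : ch = '9'; · subst g9; decide
  by_cases g0 : ch = '0'; · subst g0; decide
  have e1 : ('1' == ch) = false := by simp [Ne.symm g1]
  have e2 : ('2' == ch) = false := by simp [Ne.symm g2]
  have e3 : ('3' == ch) = false := by simp [Ne.symm g3]
  have e4 : ('4' == ch) = false := by simp [Ne.symm g4]
  have e5 : ('5' == ch) = false := by simp [Ne.symm g5]
  have e6 : ('6' == ch) = false := by simp [Ne.symm g6]
  have e7 : ('7' == ch) = false := by simp [Ne.symm g7]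
  have e8 : ('8' == ch) = false := by simp [Ne.symm g8]
  have e9 : ('9' == ch) = false := by simp [Ne.symm g9]
  have e0 : ('0' == ch) = false := by simp [Ne.symm g0]
  simp [pvCharA, pvSub, g1,g2,g3,g4,g5,g6,g7,g8,g9,g0,
    PySem.Dict.getD, PySem.Dict.get?, hitems, List.find?, e1,e2,e3,e4,e5,e6,e7,e8,e9,e0]

-- ===== VERDICT (by name: the statement is the Claim_ definition above) =====
theorem number_convertor_spec : Claim_equal_number_convertor := by
  intro mystr _
  unfold Spec_number_convertor number_convertor_alt
  apply String.toList_inj.mp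
  rw [pv_toList_A]
  simp [pv_char_eq]
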